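-- pv_equiv track=rewrite | github.com/4luqard/polymer-performance-prediction | extract_features.py | num_tetrahedral_carbon
-- ===== SOURCE A (Python) =====
-- def num_tetrahedral_carbon(smiles: str) -> int:
--     """
--     Count the number of tetrahedral carbon stereocenters in a SMILES string.
--
--     In SMILES notation:
--     - '@' indicates a tetrahedral carbon stereocenter
--     - '@@' (two consecutive '@') represents a single stereocenter with specific configuration
--     - Multiple non-consecutive '@' symbols should be counted separately
--
--     Args:
--         smiles (str): SMILES string representation of the molecule
--
--     Returns:
--         int: Number of tetrahedral carbon stereocenters
--     """
--     if not smiles: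
--         return 0
--
--     count = 0
--     i = 0
--     while i < len(smiles):
--         if smiles[i] == '@':
--             # Check if it's part of '@@'
--             if i + 1 < len(smiles) and smiles[i + 1] == '@':
--                 # Found '@@', count as one stereocenter
--                 count += 1
--                 i += 2  # Skip both '@' symbols
--             else:
--                 # Found single '@', count as one stereocenter
--                 count += 1
--                 i += 1
--         else:
--             i += 1
--
--     return count
-- ===== SOURCE B (Python) =====
-- def num_tetrahedral_carbon(smiles: str) -> int:
--     """Single pass over the characters keeping the length of the current run
--     of consecutive '@'; each maximal run of k '@' contributes ceil(k/2)
--     stereocenters (greedy '@@'-pairing)."""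
--     total = 0
--     run = 0
--     for ch in smiles:
--         if ch == '@':
--             run += 1
--         else:
--             total += (run + 1) // 2
--             run = 0
--     return total + (run + 1) // 2
-- ===== Notes on version B (the rewrite author's own statement) =====
-- stated objective: simpler
-- what changed: Replaces the index-with-skip greedy scanner by a single for-each pass that accumulates the length of the current run of the stereo marker and adds ceil(run/2) per maximal run; the direct character iteration avoids per-step indexing.
import Mathlib
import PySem

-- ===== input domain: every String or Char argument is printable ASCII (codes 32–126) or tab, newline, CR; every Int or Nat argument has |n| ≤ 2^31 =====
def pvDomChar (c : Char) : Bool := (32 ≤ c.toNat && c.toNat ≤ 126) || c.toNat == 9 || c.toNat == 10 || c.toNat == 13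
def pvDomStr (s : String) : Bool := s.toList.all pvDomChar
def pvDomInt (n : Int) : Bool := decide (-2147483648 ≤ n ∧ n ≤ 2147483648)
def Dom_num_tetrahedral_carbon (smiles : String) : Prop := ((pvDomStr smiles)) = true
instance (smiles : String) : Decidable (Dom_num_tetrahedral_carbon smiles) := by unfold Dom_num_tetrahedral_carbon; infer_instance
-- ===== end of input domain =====

-- B replaces A's index-with-skip greedy scanner by a single pass that keeps the
-- length of the current run of '@' and adds ceil(run/2) per maximal run (simpler decomposition, same cost).

-- ===== PORT A =====
-- A's while loop over positions, with the 'i+1 < len and s[i+1] == @' lookahead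
-- and the skip of 2 on '@@', ported as recursion on the remaining characters.
def pvGoA : List Char → Int
  | [] => 0
  | c :: rest =>
    if c = '@' then
      if rest.head? = some '@' then 1 + pvGoA rest.tail   -- '@@': one stereocenter, skip both
      else 1 + pvGoA rest                                 -- single '@'
    else pvGoA rest
termination_by l => l.length
decreasing_by all_goals simp

def num_tetrahedral_carbon (smiles : String) : Int :=
  if smiles = "" then 0 else pvGoA smiles.toList

-- ===== PORT B =====
-- fold over the characters with state (total, length of the current '@'-run)
def pvStepB (st : Int × Nat) (ch : Char) : Int × Nat :=
  if ch = '@' then (st.1, st.2 + 1)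
  else (st.1 + ((st.2 + 1) / 2 : Nat), 0)

def num_tetrahedral_carbon_alt (smiles : String) : Int :=
  let st := smiles.toList.foldl pvStepB (0, 0)
  st.1 + ((st.2 + 1) / 2 : Nat)

-- ===== PRECONDITION & SPEC =====
def Spec_num_tetrahedral_carbon (smiles : String) (out : Int) : Prop := out = num_tetrahedral_carbon_alt smiles
instance (smiles : String) (out : Int) : Decidable (Spec_num_tetrahedral_carbon smiles out) := by unfold Spec_num_tetrahedral_carbon; infer_instance

-- ===== CLAIM (what is proved, stated in full; the proofs are below) =====
def Claim_equal_num_tetrahedral_carbon : Prop := ∀ (smiles : String), Dom_num_tetrahedral_carbon smiles → Spec_num_tetrahedral_carbon smiles (num_tetrahedral_carbon smiles)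

-- ===== LEMMAS AND PROOFS =====

theorem pvGoA_rep (r : Nat) : pvGoA (List.replicate r '@') = (((r + 1) / 2 : Nat) : Int) := by
  induction r using Nat.strong_induction_on with
  | _ r ih =>
    match r with
    | 0 => simp [pvGoA]
    | 1 => simp [pvGoA, List.replicate]
    | r + 2 =>
      have hrep : List.replicate (r + 2) '@' = '@' :: '@' :: List.replicate r '@' := by
        simp [List.replicate]
      rw [hrep, pvGoA]
      simp [ih r (by omega)]
      omega

theorem pvGoA_rep_cons (c : Char) (hc : c ≠ '@') (l : List Char) (r : Nat) :
    pvGoA (List.replicate r '@' ++ c :: l) = (((r + 1) / 2 : Nat) : Int) + pvGoA l := by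
  induction r using Nat.strong_induction_on with
  | _ r ih =>
    match r with
    | 0 => simp [pvGoA, hc]
    | 1 =>
      simp only [List.replicate, List.nil_append, List.cons_append]
      rw [pvGoA]
      simp [hc, pvGoA]
    | r + 2 =>
      have hrep : List.replicate (r + 2) '@' ++ c :: l
           = '@' :: '@' :: (List.replicate r '@' ++ c :: l) := by simp [List.replicate]
      rw [hrep, pvGoA]
      simp [ih r (by omega)]
      omega

theorem pvFoldB_eq (l : List Char) : ∀ (total : Int) (run : Nat),
    ((l.foldl pvStepB (total, run)).1 + ((((l.foldl pvStepB (total, run)).2 + 1) / 2 : Nat) : Int))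
      = total + pvGoA (List.replicate run '@' ++ l) := by
  induction l with
  | nil =>
    intro total run
    simp only [List.foldl_nil, List.append_nil]
    rw [pvGoA_rep]
  | cons c l ih =>
    intro total run
    by_cases hc : c = '@'
    · subst hc
      have hstep : pvStepB (total, run) '@' = (total, run + 1) := by simp [pvStepB]
      rw [List.foldl_cons, hstep, ih total (run + 1)]
      have hrep : List.replicate run '@' ++ '@' :: l = List.replicate (run + 1) '@' ++ l := by
        rw [List.replicate_succ']; simp
      rw [hrep]
    · have hstep : pvStepB (total, run) c = (total + ((run + 1) / 2 : Nat), 0) := by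
        simp [pvStepB, hc]
      rw [List.foldl_cons, hstep, ih (total + ((run + 1) / 2 : Nat)) 0,
          pvGoA_rep_cons c hc l run]
      simp only [List.replicate, List.nil_append]
      ring

-- ===== VERDICT (by name: the statement is the Claim_ definition above) =====
theorem num_tetrahedral_carbon_spec : Claim_equal_num_tetrahedral_carbon := by
  intro smiles _
  unfold Spec_num_tetrahedral_carbon num_tetrahedral_carbon num_tetrahedral_carbon_alt
  have hfold := pvFoldB_eq smiles.toList 0 0
  simp only [List.replicate, List.nil_append, zero_add] at hfold
  split
  · rename_i h; subst h; simp
  · simpa using hfold.symm
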